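-- pv_equiv track=rewrite | github.com/kwasblue/Mara | host/mara_host/cli/commands/test/commands.py | _filter_by_features
-- ===== SOURCE A (Python) =====
-- FEATURE_COMMAND_MAP = {
--     "camera": "CMD_CAM_",
--     "dc_motor": "CMD_DC_",
--     "servo": "CMD_SERVO_",
--     "stepper": "CMD_STEPPER_",
--     "encoder": "CMD_ENCODER_",
--     "control_kernel": "CMD_CTRL_",
--     "signal_bus": "CMD_CTRL_SIGNAL_",
--     "gpio": "CMD_GPIO_",
-- }
--
-- def _filter_by_features(commands: list[str], features: list[str]) -> tuple[list[str], list[str]]: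
--     """Filter commands by firmware features. Returns (supported, unsupported)."""
--     supported = []
--     unsupported = []
--
--     for cmd in commands:
--         # Check if command requires a feature not in firmware
--         is_supported = True
--         for feature, prefix in FEATURE_COMMAND_MAP.items():
--             if cmd.startswith(prefix) and feature not in features:
--                 is_supported = False
--                 break
--
--         if is_supported:
--             supported.append(cmd)
--         else:
--             unsupported.append(cmd)
--
--     return supported, unsupported
-- ===== SOURCE B (Python) =====
-- FEATURE_COMMAND_MAP = {
--     "camera": "CMD_CAM_",
--     "dc_motor": "CMD_DC_",
--     "servo": "CMD_SERVO_",
--     "stepper": "CMD_STEPPER_",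
--     "encoder": "CMD_ENCODER_",
--     "control_kernel": "CMD_CTRL_",
--     "signal_bus": "CMD_CTRL_SIGNAL_",
--     "gpio": "CMD_GPIO_",
-- }
--
-- def _filter_by_features(commands, features):
--     """Transposed loop nest: each disabled feature's prefix is swept once over a
--     boolean mark array covering all commands; a final pass splits the commands
--     by their marks.  Correct because a command is unsupported exactly when some
--     disabled prefix matches it, irrespective of the order prefixes are tried."""
--     bad = [False] * len(commands)
--     for feature, prefix in FEATURE_COMMAND_MAP.items():
--         if feature not in features:
--             for i, cmd in enumerate(commands):
--                 if not bad[i] and cmd.startswith(prefix):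
--                     bad[i] = True
--     supported, unsupported = [], []
--     for cmd, b in zip(commands, bad):
--         (unsupported if b else supported).append(cmd)
--     return supported, unsupported
-- ===== Notes on version B (the rewrite author's own statement) =====
-- stated objective: alternative
-- what changed: B transposes the loop nest: instead of A's per-command inner scan of the feature map with a break flag, B sweeps each disabled feature's prefix once across a boolean mark array over all commands and then splits the commands by their marks in one final zip pass.
import Mathlib
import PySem

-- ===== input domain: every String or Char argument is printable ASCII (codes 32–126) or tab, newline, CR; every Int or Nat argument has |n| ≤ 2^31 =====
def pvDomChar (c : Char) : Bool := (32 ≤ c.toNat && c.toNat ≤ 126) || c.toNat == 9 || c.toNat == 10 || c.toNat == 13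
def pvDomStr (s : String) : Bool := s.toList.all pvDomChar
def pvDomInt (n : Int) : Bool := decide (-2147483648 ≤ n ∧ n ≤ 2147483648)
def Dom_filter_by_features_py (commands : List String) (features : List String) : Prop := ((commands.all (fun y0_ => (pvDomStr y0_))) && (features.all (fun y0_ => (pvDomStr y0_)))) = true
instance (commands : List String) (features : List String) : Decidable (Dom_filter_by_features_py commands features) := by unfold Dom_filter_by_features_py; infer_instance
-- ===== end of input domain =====

-- ===== PORT A =====
-- B transposes the loop nest (prefix-outer sweep over a mark array, then one split pass); objective: alternative.
def FEATURE_COMMAND_MAP : List (String × String) :=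
  [("camera", "CMD_CAM_"), ("dc_motor", "CMD_DC_"), ("servo", "CMD_SERVO_"),
   ("stepper", "CMD_STEPPER_"), ("encoder", "CMD_ENCODER_"), ("control_kernel", "CMD_CTRL_"),
   ("signal_bus", "CMD_CTRL_SIGNAL_"), ("gpio", "CMD_GPIO_")]

-- A's inner 'for feature, prefix in …: if …: is_supported = False; break' loop
def pvInnerA (cmd : String) (features : List String) : List (String × String) → Bool
  | [] => true
  | (feature, pfx) :: rest =>
    if PySem.Str.startswith cmd pfx && !(features.contains feature) then false
    else pvInnerA cmd features rest

def filter_by_features_py (commands : List String) (features : List String) : List String × List String :=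
  commands.foldl
    (fun acc cmd =>
      if pvInnerA cmd features FEATURE_COMMAND_MAP then (acc.1 ++ [cmd], acc.2)
      else (acc.1, acc.2 ++ [cmd]))
    ([], [])

-- ===== PORT B =====
-- Source B's in-place 'for i, cmd in enumerate(commands): if not bad[i] and cmd.startswith(prefix): bad[i] = True'
-- rendered as a zipWith over the mark list and the commands (exact: positionwise update)
def pvMark (pfx : String) (marks : List Bool) (commands : List String) : List Bool :=
  List.zipWith (fun b c => if !b && PySem.Str.startswith c pfx then true else b) marks commands

def filter_by_features_py_alt (commands : List String) (features : List String) : List String × List String :=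
  let bad := FEATURE_COMMAND_MAP.foldl
    (fun marks fp => if !(features.contains fp.1) then pvMark fp.2 marks commands else marks)
    (List.replicate commands.length false)
  (commands.zip bad).foldl
    (fun acc cb => if cb.2 then (acc.1, acc.2 ++ [cb.1]) else (acc.1 ++ [cb.1], acc.2))
    ([], [])

-- ===== PRECONDITION & SPEC =====
def Spec_filter_by_features_py (commands : List String) (features : List String) (out : List String × List String) : Prop := out = filter_by_features_py_alt commands features
instance (commands : List String) (features : List String) (out : List String × List String) : Decidable (Spec_filter_by_features_py commands features out) := by unfold Spec_filter_by_features_py; infer_instance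

-- ===== CLAIM (what is proved, stated in full; the proofs are below) =====
def Claim_equal_filter_by_features_py : Prop := ∀ (commands : List String) (features : List String), Dom_filter_by_features_py commands features → Spec_filter_by_features_py commands features (filter_by_features_py commands features)

-- ===== LEMMAS AND PROOFS =====

-- A's inner break-loop equals "no disallowed prefix matches"
theorem pvInnerA_eq (cmd : String) (features : List String) :
    ∀ l : List (String × String),
      pvInnerA cmd features l
        = !(l.any (fun fp => !(features.contains fp.1) && PySem.Str.startswith cmd fp.2)) := by
  intro l
  induction l with
  | nil => rfl
  | cons hd tl ih =>
    obtain ⟨f, p⟩ := hd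
    by_cases h : (PySem.Str.startswith cmd p && !(features.contains f)) = true <;>
      simp_all [pvInnerA, Bool.and_comm]

-- A's outer accumulator loop is two filters appended to the accumulators
theorem pvFoldA_eq (good : String → Bool) :
    ∀ (commands : List String) (sup unsup : List String),
      commands.foldl
        (fun acc cmd => if good cmd then (acc.1 ++ [cmd], acc.2) else (acc.1, acc.2 ++ [cmd]))
        (sup, unsup)
      = (sup ++ commands.filter good, unsup ++ commands.filter (fun c => !(good c))) := by
  intro commands
  induction commands with
  | nil => intro sup unsup; simp
  | cons hd tl ih =>
    intro sup unsup
    by_cases h : good hd = true <;> simp [h, ih]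

-- one sweep over marks of shape (commands.map g) ors the prefix test into g
theorem pvMark_map (pfx : String) (g : String → Bool) :
    ∀ commands : List String,
      pvMark pfx (commands.map g) commands
        = commands.map (fun c => g c || PySem.Str.startswith c pfx) := by
  intro commands
  induction commands with
  | nil => rfl
  | cons hd tl ih =>
    by_cases h : g hd = true <;> simp [pvMark] at ih ⊢ <;> simp [h, ih]

-- the whole mark-building fold computes, per command, "some disabled prefix matches"
theorem pvMarkFold_eq (features : List String) (commands : List String) :
    ∀ (l : List (String × String)) (g : String → Bool),
      l.foldl
        (fun marks fp => if !(features.contains fp.1) then pvMark fp.2 marks commands else marks)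
        (commands.map g)
      = commands.map (fun c =>
          g c || l.any (fun fp => !(features.contains fp.1) && PySem.Str.startswith c fp.2)) := by
  intro l
  induction l with
  | nil => intro g; simp
  | cons hd tl ih =>
    intro g
    rw [List.foldl_cons]
    by_cases h : features.contains hd.1 = true
    · rw [if_neg (by simpa [List.contains_eq_mem] using h), ih g]
      have h' : decide (hd.1 ∈ features) = true := by simpa [List.contains_eq_mem] using h
      simp [List.any_cons, h']
    · rw [if_pos (by simpa [List.contains_eq_mem] using h), pvMark_map, ih (fun c => g c || PySem.Str.startswith c hd.2)]
      have h' : decide (hd.1 ∈ features) = false := by simpa [List.contains_eq_mem] using h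
      simp [List.any_cons, h', Bool.or_assoc]

-- the zip-split pass is two filters
theorem pvSplit_eq (f : String → Bool) :
    ∀ (commands : List String) (sup unsup : List String),
      ((commands.zip (commands.map f)).foldl
        (fun acc cb => if cb.2 then (acc.1, acc.2 ++ [cb.1]) else (acc.1 ++ [cb.1], acc.2))
        (sup, unsup))
      = (sup ++ commands.filter (fun c => !(f c)), unsup ++ commands.filter f) := by
  intro commands
  induction commands with
  | nil => intro sup unsup; simp
  | cons hd tl ih =>
    intro sup unsup
    by_cases h : f hd = true <;> simp [h, ih]

-- ===== VERDICT (by name: the statement is the Claim_ definition above) =====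
theorem filter_by_features_py_spec : Claim_equal_filter_by_features_py := by
  intro commands features _
  unfold Spec_filter_by_features_py filter_by_features_py filter_by_features_py_alt
  have hrep : List.replicate commands.length false = commands.map (fun _ => false) := by
    simp [List.map_const']
  rw [pvFoldA_eq, hrep, pvMarkFold_eq features commands FEATURE_COMMAND_MAP (fun _ => false),
    pvSplit_eq]
  simp [pvInnerA_eq]
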